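-- pv_equiv track=rewrite | github.com/AndyWilliams0n/Assist-Git-App | app/agents_jira/runtime.py | _pick_tool
-- ===== SOURCE A (Python) =====
-- from typing import Any
--
-- def _tool_name(value: dict[str, Any]) -> str:
--     return str(value.get("name") or "").strip()
--
-- def _pick_tool(tools: list[dict[str, Any]], configured_tool: str | None = None) -> str:
--     if not tools:
--         raise RuntimeError("No MCP tools available on the selected server.")
--     if configured_tool:
--         for tool in tools:
--             if _tool_name(tool) == configured_tool:
--                 return configured_tool
--     names = [_tool_name(tool) for tool in tools if _tool_name(tool)]
--     if "searchJiraIssuesUsingJql" in names: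
--         return "searchJiraIssuesUsingJql"
--     if "search" in names:
--         return "search"
--
--     scored: list[tuple[int, str]] = []
--     for tool in tools:
--         name = _tool_name(tool)
--         if not name:
--             continue
--         lowered_name = name.lower()
--         description = str(tool.get("description") or "").lower()
--         score = 0
--         for keyword, points in (
--             ("jira", 5),
--             ("issue", 5),
--             ("ticket", 5),
--             ("backlog", 5),
--             ("search", 4),
--             ("query", 4),
--             ("jql", 4),
--             ("list", 2),
--         ):
--             if keyword in lowered_name:
--                 score += points
--             if keyword in description:
--                 score += 1
--         scored.append((score, name))
--     if not scored:
--         raise RuntimeError("No usable MCP tool names found.")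
--     scored.sort(key=lambda item: item[0], reverse=True)
--     return scored[0][1]
-- ===== SOURCE B (Python) =====
-- from typing import Any
--
-- _KEYWORDS = (
--     ("jira", 5),
--     ("issue", 5),
--     ("ticket", 5),
--     ("backlog", 5),
--     ("search", 4),
--     ("query", 4),
--     ("jql", 4),
--     ("list", 2),
-- )
--
--
-- def _tool_name(value: dict[str, Any]) -> str:
--     return str(value.get("name") or "").strip()
--
--
-- def _pick_tool(tools: list[dict[str, Any]], configured_tool: str | None = None) -> str:
--     if not tools:
--         raise RuntimeError("No MCP tools available on the selected server.")
--     if configured_tool: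
--         for tool in tools:
--             if _tool_name(tool) == configured_tool:
--                 return configured_tool
--     for exact in ("searchJiraIssuesUsingJql", "search"):
--         if any(_tool_name(tool) == exact for tool in tools):
--             return exact
--     best_name = None
--     best_score = -1
--     for tool in tools:
--         name = _tool_name(tool)
--         if not name:
--             continue
--         lowered_name = name.lower()
--         description = str(tool.get("description") or "").lower()
--         score = 0
--         for keyword, points in _KEYWORDS:
--             if keyword in lowered_name:
--                 score += points
--             if keyword in description:
--                 score += 1
--         if score > best_score:
--             best_name, best_score = name, score
--     if best_name is None:
--         raise RuntimeError("No usable MCP tool names found.")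
--     return best_name
-- ===== Notes on version B (the rewrite author's own statement) =====
-- stated objective: alternative
-- what changed: The build-scored-list, stable-descending-sort, take-first phase is replaced by a single running-maximum pass (update only on strictly greater score, so the first maximal name still wins), and the two exact-name checks scan tools directly instead of materialising a filtered names list.
-- outside the precondition, e.g. on _pick_tool([{'name': '  '}], None): A raises RuntimeError, B raises RuntimeError; on _pick_tool([], None): A raises RuntimeError, B raises RuntimeError
import Mathlib
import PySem

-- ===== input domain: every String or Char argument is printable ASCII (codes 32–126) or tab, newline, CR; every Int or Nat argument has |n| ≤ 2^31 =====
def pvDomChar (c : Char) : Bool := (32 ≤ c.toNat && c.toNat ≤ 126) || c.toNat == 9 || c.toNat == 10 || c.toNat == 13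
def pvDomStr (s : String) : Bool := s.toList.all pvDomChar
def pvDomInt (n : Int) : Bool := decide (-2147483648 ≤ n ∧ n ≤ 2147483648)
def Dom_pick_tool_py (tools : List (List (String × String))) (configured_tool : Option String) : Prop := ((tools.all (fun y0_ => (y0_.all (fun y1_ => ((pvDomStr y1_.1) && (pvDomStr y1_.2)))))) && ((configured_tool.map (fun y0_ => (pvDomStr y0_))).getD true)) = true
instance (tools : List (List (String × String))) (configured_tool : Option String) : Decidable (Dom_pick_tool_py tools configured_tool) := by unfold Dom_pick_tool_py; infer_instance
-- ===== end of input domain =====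

-- B replaces A's scored-list + stable descending sort + take-first phase by a single
-- running-maximum pass (strict-greater update keeps the first maximal name) and scans
-- tools directly for the two exact names instead of materialising a filtered names list.


-- shared helpers: both Pythons define the identical _tool_name, the identical keyword
-- table with its inner scoring loop, and the identical configured_tool early-return loop
def pvToolName (tool : List (String × String)) : String :=
  PySem.Str.strip ((PySem.Dict.mk tool).getD "name" "")

def pvKeywords : List (String × Int) :=
  [("jira", 5), ("issue", 5), ("ticket", 5), ("backlog", 5),
   ("search", 4), ("query", 4), ("jql", 4), ("list", 2)]

def pvScore (lowered_name description : String) : Int :=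
  pvKeywords.foldl (fun score kw =>
    let score := if PySem.Str.isIn kw.1 lowered_name then score + kw.2 else score
    if PySem.Str.isIn kw.1 description then score + 1 else score) 0

def pvDesc (tool : List (String × String)) : String :=
  PySem.Str.lower ((PySem.Dict.mk tool).getD "description" "")

-- 'if configured_tool:' + the matching loop (textually the same in A and B)
def pvCfgHit (tools : List (List (String × String))) (configured_tool : Option String) : Bool :=
  match configured_tool with
  | some c => (c != "") && tools.any (fun t => pvToolName t == c)
  | none => false

-- ===== PORT A =====
-- where the Python raises RuntimeError the port returns "" (those inputs are excluded by Pre_)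
def pick_tool_py (tools : List (List (String × String))) (configured_tool : Option String) : String :=
  if tools = [] then ""
  else if pvCfgHit tools configured_tool then configured_tool.getD ""
  else
    let names := (tools.map pvToolName).filter (fun n => n ≠ "")
    if "searchJiraIssuesUsingJql" ∈ names then "searchJiraIssuesUsingJql"
    else if "search" ∈ names then "search"
    else
      let scored : List (Int × String) := tools.foldl (fun acc tool =>
        let name := pvToolName tool
        if name = "" then acc
        else acc ++ [(pvScore (PySem.Str.lower name) (pvDesc tool), name)]) []
      match PySem.List.sorted scored (fun item => item.1) true with
      | [] => ""
      | top :: _ => top.2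

-- ===== PORT B =====
def pick_tool_py_alt (tools : List (List (String × String))) (configured_tool : Option String) : String :=
  if tools = [] then ""
  else if pvCfgHit tools configured_tool then configured_tool.getD ""
  else if tools.any (fun t => pvToolName t == "searchJiraIssuesUsingJql") then
    "searchJiraIssuesUsingJql"
  else if tools.any (fun t => pvToolName t == "search") then
    "search"
  else
    let best := tools.foldl (fun (best : Option String × Int) tool =>
      let name := pvToolName tool
      if name = "" then best
      else
        let score := pvScore (PySem.Str.lower name) (pvDesc tool)
        if best.2 < score then (some name, score) else best) (none, -1)
    match best.1 with
    | none => ""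
    | some n => n

-- ===== PRECONDITION & SPEC =====
-- Pre_ excludes exactly the inputs on which A raises RuntimeError: an empty tools list,
-- or one whose tools all have an empty (after strip) name.
def Pre_pick_tool_py (tools : List (List (String × String))) (configured_tool : Option String) : Prop :=
  tools.any (fun t => pvToolName t ≠ "") = true
instance (tools : List (List (String × String))) (configured_tool : Option String) : Decidable (Pre_pick_tool_py tools configured_tool) := by unfold Pre_pick_tool_py; infer_instance

def pvWitness_pick_tool_py : (List (List (String × String))) × Option String :=
  ([[("name", "jira tool"), ("description", "searches issues")]], some "x")

def Spec_pick_tool_py (tools : List (List (String × String))) (configured_tool : Option String) (out : String) : Prop := out = pick_tool_py_alt tools configured_tool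
instance (tools : List (List (String × String))) (configured_tool : Option String) (out : String) : Decidable (Spec_pick_tool_py tools configured_tool out) := by unfold Spec_pick_tool_py; infer_instance

-- ===== CLAIM (what is proved, stated in full; the proofs are below) =====
def Claim_equal_pick_tool_py : Prop := ∀ (tools : List (List (String × String))) (configured_tool : Option String), Dom_pick_tool_py tools configured_tool → Pre_pick_tool_py tools configured_tool → Spec_pick_tool_py tools configured_tool (pick_tool_py tools configured_tool)

-- ===== LEMMAS AND PROOFS =====

-- the scored entry of one tool, and the list of scored entries in tool order
def pvEntry (tool : List (String × String)) : Int × String :=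
  (pvScore (PySem.Str.lower (pvToolName tool)) (pvDesc tool), pvToolName tool)

def pvEntries (tools : List (List (String × String))) : List (Int × String) :=
  (tools.filter (fun t => pvToolName t != "")).map pvEntry

-- membership of a nonempty name in A's filtered names list = B's any-scan
lemma mem_filter_names (tools : List (List (String × String))) (s : String) (hs : s ≠ "") :
    (s ∈ (tools.map pvToolName).filter (fun n => n ≠ "")) ↔
      tools.any (fun t => pvToolName t == s) = true := by
  constructor
  · intro hmem
    rcases List.mem_filter.mp hmem with ⟨hmap, _⟩
    rcases List.mem_map.mp hmap with ⟨t, ht, hft⟩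
    exact List.any_eq_true.mpr ⟨t, ht, by simp [hft]⟩
  · intro hany
    rcases List.any_eq_true.mp hany with ⟨t, ht, hbeq⟩
    refine List.mem_filter.mpr ⟨List.mem_map.mpr ⟨t, ht, by simpa using hbeq⟩, by simpa using hs⟩

-- A's scored loop builds exactly pvEntries
lemma scored_eq_entries (tools : List (List (String × String))) :
    tools.foldl (fun acc tool =>
        let name := pvToolName tool
        if name = "" then acc
        else acc ++ [(pvScore (PySem.Str.lower name) (pvDesc tool), name)]) [] = pvEntries tools := by
  have hstep : (fun (acc : List (Int × String)) tool =>
      let name := pvToolName tool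
      if name = "" then acc
      else acc ++ [(pvScore (PySem.Str.lower name) (pvDesc tool), name)]) =
      (fun acc tool => if (pvToolName tool != "") = true then acc ++ [pvEntry tool] else acc) := by
    funext acc tool
    by_cases h : pvToolName tool = "" <;> simp [h, pvEntry]
  rw [hstep, PySem.List.foldl_append_if]
  simp [pvEntries]

-- B's best loop is the same fold taken over pvEntries
lemma best_eq_entries_fold (tools : List (List (String × String))) (init : Option String × Int) :
    tools.foldl (fun (best : Option String × Int) tool =>
        let name := pvToolName tool
        if name = "" then best
        else
          let score := pvScore (PySem.Str.lower name) (pvDesc tool)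
          if best.2 < score then (some name, score) else best) init =
      (pvEntries tools).foldl
        (fun best x => if best.2 < x.1 then (some x.2, x.1) else best) init := by
  have hstep : (fun (best : Option String × Int) tool =>
      let name := pvToolName tool
      if name = "" then best
      else
        let score := pvScore (PySem.Str.lower name) (pvDesc tool)
        if best.2 < score then (some name, score) else best) =
      (fun best tool => if (pvToolName tool != "") = true then
          (if best.2 < (pvEntry tool).1 then (some (pvEntry tool).2, (pvEntry tool).1) else best)
        else best) := by
    funext best tool
    show (if pvToolName tool = "" then best
        else
          if best.2 < pvScore (PySem.Str.lower (pvToolName tool)) (pvDesc tool) then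
            (some (pvToolName tool), pvScore (PySem.Str.lower (pvToolName tool)) (pvDesc tool))
          else best) = _
    by_cases h : pvToolName tool = ""
    · rw [if_pos h, if_neg (show ¬ ((pvToolName tool != "") = true) by simp [h])]
    · rw [if_neg h, if_pos (show (pvToolName tool != "") = true by simpa using h), pvEntry]
  rw [hstep, pvEntries, List.foldl_map, List.foldl_filter]

-- every score is nonnegative (the keyword points are, and the loop starts at 0)
lemma score_fold_ge (kws : List (String × Int)) (a b : String) (init : Int)
    (hk : ∀ kw ∈ kws, 0 ≤ kw.2) :
    init ≤ kws.foldl (fun score kw =>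
      let score := if PySem.Str.isIn kw.1 a then score + kw.2 else score
      if PySem.Str.isIn kw.1 b then score + 1 else score) init := by
  induction kws generalizing init with
  | nil => simp
  | cons kw rest ih =>
    have h1 : 0 ≤ kw.2 := hk kw (by simp)
    refine le_trans ?_ (ih _ (fun k hkmem => hk k (by simp [hkmem])))
    dsimp only
    split_ifs <;> omega

lemma pvScore_nonneg (a b : String) : 0 ≤ pvScore a b :=
  score_fold_ge pvKeywords a b 0 (by decide)

-- invariant tying the head of A's insertBy accumulator to B's running best
def pvRel (acc : List (Int × String)) (best : Option String × Int) : Prop :=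
  (acc = [] ∧ best = (none, -1)) ∨
  (∃ n rest, acc = (best.2, n) :: rest ∧ best.1 = some n)

lemma pvRel_foldl (l : List (Int × String)) (hl : ∀ x ∈ l, 0 ≤ x.1)
    (acc : List (Int × String)) (best : Option String × Int) (h : pvRel acc best) :
    pvRel
      (l.foldl (fun acc x => PySem.List.insertBy (fun a b => decide (b.1 < a.1)) x acc) acc)
      (l.foldl (fun best x => if best.2 < x.1 then (some x.2, x.1) else best) best) := by
  induction l generalizing acc best with
  | nil => simpa using h
  | cons x rest ih =>
    simp only [List.foldl_cons]
    refine ih (fun y hy => hl y (by simp [hy])) _ _ ?_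
    have hx : 0 ≤ x.1 := hl x (by simp)
    rcases h with ⟨rfl, rfl⟩ | ⟨n, tl, rfl, hb⟩
    · rw [if_pos (by omega : (-1 : Int) < x.1)]
      exact Or.inr ⟨x.2, [], by simp [PySem.List.insertBy], rfl⟩
    · by_cases hlt : best.2 < x.1
      · rw [if_pos hlt]
        exact Or.inr ⟨x.2, (best.2, n) :: tl, by simp [PySem.List.insertBy, hlt], rfl⟩
      · rw [if_neg hlt]
        exact Or.inr ⟨n, PySem.List.insertBy (fun a b => decide (b.1 < a.1)) x tl,
          by simp [PySem.List.insertBy, hlt], hb⟩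

-- ===== VERDICT (by name: the statement is the Claim_ definition above) =====
theorem pick_tool_py_spec : Claim_equal_pick_tool_py := by
  intro tools configured_tool _ _
  unfold Spec_pick_tool_py pick_tool_py pick_tool_py_alt
  by_cases h0 : tools = []
  · simp [h0]
  rw [if_neg h0, if_neg h0]
  by_cases hc : pvCfgHit tools configured_tool
  · rw [if_pos hc, if_pos hc]
  rw [if_neg hc, if_neg hc]
  by_cases h1 : tools.any (fun t => pvToolName t == "searchJiraIssuesUsingJql") = true
  · rw [if_pos ((mem_filter_names tools _ (by decide)).mpr h1), if_pos h1]
  rw [if_neg (fun hm => h1 ((mem_filter_names tools _ (by decide)).mp hm)),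
      if_neg (fun hh => h1 hh)]
  by_cases h2 : tools.any (fun t => pvToolName t == "search") = true
  · rw [if_pos ((mem_filter_names tools _ (by decide)).mpr h2), if_pos h2]
  rw [if_neg (fun hm => h2 ((mem_filter_names tools _ (by decide)).mp hm)),
      if_neg (fun hh => h2 hh)]
  simp only [scored_eq_entries, best_eq_entries_fold,
    PySem.List.sorted_rev_eq_foldl_insertBy]
  have hrel := pvRel_foldl (pvEntries tools)
    (by
      intro x hx
      rcases List.mem_map.mp hx with ⟨t, _, rfl⟩
      exact pvScore_nonneg _ _)
    [] (none, -1) (Or.inl ⟨rfl, rfl⟩)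
  rcases hrel with ⟨he, hb⟩ | ⟨n, tl, he, hb⟩
  · rw [he, hb]
  · rw [he, hb]
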